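-- pv_equiv track=rewrite | github.com/qxxxb/ctf | 2020/xmas_ctf/biggest_lowest/solve.py | solve
-- ===== SOURCE A (Python) =====
-- import heapq
--
-- def solve(xs, k1, k2):
--     hlow = []
--     hhigh = []
--
--     for x in xs:
--         heapq.heappush(hlow, x)
--         heapq.heappush(hhigh, -x)
--
--     lows = []
--     highs = []
--
--     for _ in range(k1):
--         lows.append(heapq.heappop(hlow))
--     for _ in range(k2):
--         highs.append(-heapq.heappop(hhigh))
--
--     return lows, highs
-- ===== SOURCE B (Python) =====
-- def solve(xs, k1, k2):
--     s = sorted(xs)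
--     n = len(s)
--     lows = [s[i] for i in range(k1)]
--     highs = [s[n - 1 - i] for i in range(k2)]
--     return lows, highs
-- ===== Notes on version B (the rewrite author's own statement) =====
-- stated objective: faster
-- what changed: B sorts the list once and reads both answers off the sorted array by direct indexing (prefix for the k1 smallest, back-to-front for the k2 largest), replacing A's two binary heaps built by n pushes and drained by k pops.
import Mathlib
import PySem

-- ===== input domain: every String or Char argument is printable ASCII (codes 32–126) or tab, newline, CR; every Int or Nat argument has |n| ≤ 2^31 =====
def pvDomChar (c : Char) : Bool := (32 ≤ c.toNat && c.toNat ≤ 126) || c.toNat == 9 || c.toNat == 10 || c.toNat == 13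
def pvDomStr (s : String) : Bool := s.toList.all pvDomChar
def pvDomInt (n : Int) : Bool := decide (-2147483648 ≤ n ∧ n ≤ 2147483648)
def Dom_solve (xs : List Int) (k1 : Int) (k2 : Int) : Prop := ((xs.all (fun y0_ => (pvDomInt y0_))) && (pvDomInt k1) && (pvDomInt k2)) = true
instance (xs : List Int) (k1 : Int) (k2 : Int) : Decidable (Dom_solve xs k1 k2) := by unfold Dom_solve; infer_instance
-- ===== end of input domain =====

-- B replaces A's two binary heaps (n pushes, k pops each) by one sort read off by direct indexing; measurably faster by a constant factor.

-- ===== PORT A =====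
-- A uses CPython's heapq; heappush/heappop (with their _siftdown/_siftup helpers)
-- are transliterated below from CPython's Lib/heapq.py, step for step.

-- _siftdown's while-loop (newitem = heap[pos] is read once before the loop)
def siftdownLoop (newitem : Int) (startpos : Nat) (heap : List Int) (pos : Nat) : List Int × Nat :=
  if _h : startpos < pos then
    let parentpos := (pos - 1) / 2
    let parent := heap.getD parentpos 0
    if newitem < parent then
      siftdownLoop newitem startpos (heap.set pos parent) parentpos
    else (heap, pos)
  else (heap, pos)
termination_by pos
decreasing_by omega

-- heapq._siftdown(heap, startpos, pos)
def siftdown (heap : List Int) (startpos : Nat) (pos : Nat) : List Int :=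
  let newitem := heap.getD pos 0
  let r := siftdownLoop newitem startpos heap pos
  r.1.set r.2 newitem

-- heapq.heappush: heap.append(item); _siftdown(heap, 0, len(heap)-1)
def heappush (heap : List Int) (item : Int) : List Int :=
  siftdown (heap ++ [item]) 0 heap.length

-- _siftup's while-loop (moves the smaller child up until reaching a leaf)
def siftupLoop (endpos : Nat) (heap : List Int) (pos : Nat) : List Int × Nat :=
  let childpos := 2 * pos + 1
  if _h : childpos < endpos then
    let rightpos := childpos + 1
    let childpos := if rightpos < endpos ∧ ¬ (heap.getD childpos 0 < heap.getD rightpos 0)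
      then rightpos else childpos
    siftupLoop endpos (heap.set pos (heap.getD childpos 0)) childpos
  else (heap, pos)
termination_by endpos - pos
decreasing_by split <;> omega

-- heapq._siftup(heap, pos): sift to a leaf, put newitem there, then _siftdown back up
def siftup (heap : List Int) (pos : Nat) : List Int :=
  let endpos := heap.length
  let startpos := pos
  let newitem := heap.getD pos 0
  let r := siftupLoop endpos heap pos
  siftdown (r.1.set r.2 newitem) startpos r.2

-- heapq.heappop; Python raises IndexError on an empty heap (excluded by Pre_solve),
-- the (0, []) branch is a totality guard only.
def heappop (heap : List Int) : Int × List Int :=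
  match heap.getLast? with
  | none => (0, [])
  | some lastelt =>
    let rest := heap.dropLast
    if rest.isEmpty then (lastelt, [])
    else
      let returnitem := rest.getD 0 0
      (returnitem, siftup (rest.set 0 lastelt) 0)

-- "for _ in range(k1): lows.append(heapq.heappop(hlow))"
def popLoop (n : Nat) (heap : List Int) (acc : List Int) : List Int × List Int :=
  match n with
  | 0 => (acc, heap)
  | m + 1 =>
    let r := heappop heap
    popLoop m r.2 (acc ++ [r.1])

-- "for _ in range(k2): highs.append(-heapq.heappop(hhigh))"
def popLoopNeg (n : Nat) (heap : List Int) (acc : List Int) : List Int × List Int :=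
  match n with
  | 0 => (acc, heap)
  | m + 1 =>
    let r := heappop heap
    popLoopNeg m r.2 (acc ++ [-r.1])

def solve (xs : List Int) (k1 : Int) (k2 : Int) : List (List Int) :=
  let hlow := xs.foldl (fun h x => heappush h x) []
  let hhigh := xs.foldl (fun h x => heappush h (-x)) []
  let lows := (popLoop k1.toNat hlow []).1
  let highs := (popLoopNeg k2.toNat hhigh []).1
  [lows, highs]

-- ===== PORT B =====
-- Source B: sort once; lows = [s[i] for i in range(k1)], highs = [s[n-1-i] for i in range(k2)].
-- s[...] is ported as pyGetD (in-range under Pre_solve; the default is a totality guard only).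
def solve_alt (xs : List Int) (k1 : Int) (k2 : Int) : List (List Int) :=
  let s := PySem.List.sorted xs (fun x => x) false
  let n := PySem.List.len s
  let lows := (PySem.List.pyRange 0 k1).map (fun i => PySem.List.pyGetD s i 0)
  let highs := (PySem.List.pyRange 0 k2).map (fun i => PySem.List.pyGetD s (n - 1 - i) 0)
  [lows, highs]

-- ===== PRECONDITION & SPEC =====
-- A pops k1 (resp. k2) times from a heap of len(xs) elements: it raises IndexError
-- as soon as a pop hits the empty heap, i.e. exactly when k1 > len(xs) or k2 > len(xs).
def Pre_solve (xs : List Int) (k1 : Int) (k2 : Int) : Prop :=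
  k1 ≤ (xs.length : Int) ∧ k2 ≤ (xs.length : Int)
instance (xs : List Int) (k1 : Int) (k2 : Int) : Decidable (Pre_solve xs k1 k2) := by
  unfold Pre_solve; infer_instance

def pvWitness_solve : List Int × Int × Int := ([3, 1, 4, 1, 5], 2, 3)

def Spec_solve (xs : List Int) (k1 : Int) (k2 : Int) (out : List (List Int)) : Prop :=
  out = solve_alt xs k1 k2
instance (xs : List Int) (k1 : Int) (k2 : Int) (out : List (List Int)) : Decidable (Spec_solve xs k1 k2 out) := by
  unfold Spec_solve; infer_instance

-- ===== CLAIM (what is proved, stated in full; the proofs are below) =====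
def Claim_equal_solve : Prop := ∀ (xs : List Int) (k1 : Int) (k2 : Int),
  Dom_solve xs k1 k2 → Pre_solve xs k1 k2 → Spec_solve xs k1 k2 (solve xs k1 k2)

-- ===== LEMMAS AND PROOFS =====

-- indexing after set, with the set index in range
theorem getD_set' (l : List Int) (i j : Nat) (v d : Int) (h : i < l.length) :
    (l.set i v).getD j d = if j = i then v else l.getD j d := by
  rw [List.getD_eq_getElem?_getD, List.getD_eq_getElem?_getD, List.getElem?_set]
  by_cases hij : i = j
  · subst hij; simp [h]
  · simp [hij, Ne.symm hij]

theorem getD_set2 (l : List Int) (p q j : Nat) (u v : Int) (hp : p < l.length)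
    (hq : q < l.length) :
    ((l.set p u).set q v).getD j 0 =
      if j = q then v else if j = p then u else l.getD j 0 := by
  rw [getD_set' _ _ _ _ _ (by simpa using hq), getD_set' _ _ _ _ _ hp]

-- the binary-heap shape invariant on the array representation
def IsHeap (l : List Int) : Prop :=
  ∀ j : Nat, 0 < j → j < l.length → l.getD ((j - 1) / 2) 0 ≤ l.getD j 0

-- all parent→child edges hold except possibly the one INTO position p
def EdgesExcept (l : List Int) (p : Nat) : Prop :=
  ∀ j : Nat, 0 < j → j < l.length → j ≠ p → l.getD ((j - 1) / 2) 0 ≤ l.getD j 0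

-- the grandparent of p bounds the children of p
def GrandBound (l : List Int) (p : Nat) : Prop :=
  ∀ j : Nat, j < l.length → (j - 1) / 2 = p → 0 < p → l.getD ((p - 1) / 2) 0 ≤ l.getD j 0

theorem siftdownLoop_spec (newitem : Int) :
    ∀ (pos : Nat) (heap : List Int), pos < heap.length →
    EdgesExcept (heap.set pos newitem) pos →
    GrandBound (heap.set pos newitem) pos →
    (siftdownLoop newitem 0 heap pos).2 < heap.length ∧
    (siftdownLoop newitem 0 heap pos).1.length = heap.length ∧
    ((siftdownLoop newitem 0 heap pos).1.set (siftdownLoop newitem 0 heap pos).2 newitem).Perm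
      (heap.set pos newitem) ∧
    IsHeap ((siftdownLoop newitem 0 heap pos).1.set (siftdownLoop newitem 0 heap pos).2 newitem) := by
  intro pos
  induction pos using Nat.strong_induction_on with
  | _ pos IH =>
    intro heap hpos hJ1 hJ2
    rw [siftdownLoop]
    split
    · next h0 =>
      dsimp only
      split
      · next hlt =>
        -- recursive step: newitem < parent
        set pp := (pos - 1) / 2 with hppdef
        set par := heap.getD pp 0 with hpardef
        have hppos : pp < pos := by omega
        have hpplen : pp < heap.length := lt_trans hppos hpos
        have hppne : pp ≠ pos := Nat.ne_of_lt hppos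
        have hBval : ∀ j, (heap.set pos newitem).getD j 0 =
            if j = pos then newitem else heap.getD j 0 :=
          fun j => getD_set' heap pos j newitem 0 hpos
        have hB'val : ∀ j, ((heap.set pos par).set pp newitem).getD j 0 =
            if j = pp then newitem else if j = pos then par else heap.getD j 0 :=
          fun j => getD_set2 heap pos pp j par newitem hpos hpplen
        have hBlen : (heap.set pos newitem).length = heap.length := by simp
        have hB'len : ((heap.set pos par).set pp newitem).length = heap.length := by simp
        have hJ1' : EdgesExcept ((heap.set pos par).set pp newitem) pp := by
          intro j hj hjlen hjpp
          rw [hB'len] at hjlen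
          rw [hB'val, hB'val]
          by_cases hjpos : j = pos
          · subst hjpos
            have hq : (j - 1) / 2 = pp := hppdef.symm
            rw [if_pos hq, if_neg hjpp, if_pos rfl]
            exact le_of_lt hlt
          · by_cases hqpp : (j - 1) / 2 = pp
            · have h1 := hJ1 j hj (by rwa [hBlen]) hjpos
              rw [hBval, hBval] at h1
              have hqpos : (j - 1) / 2 ≠ pos := by rw [hqpp]; exact hppne
              rw [if_neg hqpos, if_neg hjpos] at h1
              rw [hqpp] at h1
              rw [if_pos hqpp, if_neg hjpp, if_neg hjpos]
              exact le_trans (le_of_lt hlt) h1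
            · by_cases hqpos : (j - 1) / 2 = pos
              · have h2 := hJ2 j (by rwa [hBlen]) hqpos h0
                rw [hBval, hBval] at h2
                rw [if_neg (hppdef ▸ hppne), if_neg hjpos] at h2
                rw [if_neg hqpp, if_pos hqpos, if_neg hjpp, if_neg hjpos]
                rw [← hppdef] at h2
                exact h2
              · have h1 := hJ1 j hj (by rwa [hBlen]) hjpos
                rw [hBval, hBval] at h1
                rw [if_neg hqpos, if_neg hjpos] at h1
                rw [if_neg hqpp, if_neg hqpos, if_neg hjpp, if_neg hjpos]
                exact h1
        have hJ2' : GrandBound ((heap.set pos par).set pp newitem) pp := by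
          intro j hjlen hq hpp0
          rw [hB'len] at hjlen
          have hgpp : (pp - 1) / 2 ≠ pp := by omega
          have hgpos : (pp - 1) / 2 ≠ pos := by omega
          have hjge : 2 * pp + 1 ≤ j := by omega
          have hjpp : j ≠ pp := by omega
          have hppB : pp < (heap.set pos newitem).length := by rwa [hBlen]
          have hchain := hJ1 pp hpp0 hppB hppne
          rw [hBval, hBval] at hchain
          rw [if_neg hgpos, if_neg hppne] at hchain
          rw [hB'val, hB'val, if_neg hgpp, if_neg hgpos]
          by_cases hjpos : j = pos
          · subst hjpos
            rw [if_neg hjpp, if_pos rfl]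
            exact hchain
          · rw [if_neg hjpp, if_neg hjpos]
            have hj0 : 0 < j := by omega
            have h1 := hJ1 j hj0 (by rwa [hBlen]) hjpos
            rw [hBval, hBval] at h1
            have hqpos : (j - 1) / 2 ≠ pos := by rw [hq]; exact hppne
            rw [if_neg hqpos, if_neg hjpos, hq] at h1
            exact le_trans hchain h1
        obtain ⟨ih1, ih2, ih3, ih4⟩ :=
          IH pp hppos (heap.set pos par) (by simpa using hpplen) hJ1' hJ2'
        have hlen' : (heap.set pos par).length = heap.length := by simp
        refine ⟨by rwa [hlen'] at ih1, by rwa [hlen'] at ih2, ?_, ih4⟩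
        refine ih3.trans ?_
        -- ((heap.set pos par).set pp newitem) is a transposition of (heap.set pos newitem)
        have h1 : pos < (heap.set pos newitem).length := by simpa using hpos
        have h2 : pp < (heap.set pos newitem).length := by simpa using hpplen
        have hperm := List.set_set_perm (as := heap.set pos newitem) h1 h2
        have e1 : (heap.set pos newitem)[pp] = par := by
          rw [List.getElem_set, if_neg (Ne.symm hppne)]
          exact (List.getD_eq_getElem heap 0 hpplen).symm
        have e2 : (heap.set pos newitem)[pos] = newitem := by
          rw [List.getElem_set, if_pos rfl]
        rw [e1, e2, List.set_set] at hperm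
        exact hperm
      · next hlt =>
        -- stop: parent ≤ newitem, heap with newitem written at pos is a heap
        refine ⟨hpos, rfl, List.Perm.refl _, ?_⟩
        intro j hj hjlen
        have hjlen' : j < heap.length := by simpa using hjlen
        by_cases hje : j = pos
        · subst hje
          have hne : (j - 1) / 2 ≠ j := by omega
          rw [getD_set' heap j ((j - 1) / 2) newitem 0 hpos,
              getD_set' heap j j newitem 0 hpos, if_pos rfl, if_neg hne]
          exact le_of_not_gt hlt
        · exact hJ1 j hj hjlen hje
    · next h0 =>
      -- pos = 0: nothing to do
      have hp0 : pos = 0 := by omega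
      refine ⟨hpos, rfl, List.Perm.refl _, ?_⟩
      intro j hj hjlen
      exact hJ1 j hj hjlen (by omega)

theorem siftdown_spec (heap : List Int) (pos : Nat) (hpos : pos < heap.length)
    (hJ1 : EdgesExcept heap pos) (hJ2 : GrandBound heap pos) :
    (siftdown heap 0 pos).length = heap.length ∧
    (siftdown heap 0 pos).Perm heap ∧ IsHeap (siftdown heap 0 pos) := by
  unfold siftdown
  dsimp only
  have hself : heap.set pos (heap.getD pos 0) = heap := by
    rw [List.getD_eq_getElem heap 0 hpos]
    exact List.set_getElem_self hpos
  obtain ⟨h1, h2, h3, h4⟩ :=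
    siftdownLoop_spec (heap.getD pos 0) pos heap hpos (by rwa [hself]) (by rwa [hself])
  rw [hself] at h3
  exact ⟨by rw [List.length_set]; exact h2, h3, h4⟩

theorem heappush_spec (h : List Int) (x : Int) (hh : IsHeap h) :
    (heappush h x).length = h.length + 1 ∧
    (heappush h x).Perm (x :: h) ∧ IsHeap (heappush h x) := by
  have hpos : h.length < (h ++ [x]).length := by simp
  have hJ1 : EdgesExcept (h ++ [x]) h.length := by
    intro j hj hjlen hjne
    have hjlt : j < h.length := by simp at hjlen; omega
    rw [List.getD_append _ _ _ _ (by omega), List.getD_append _ _ _ _ hjlt]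
    exact hh j hj hjlt
  have hJ2 : GrandBound (h ++ [x]) h.length := by
    intro j hjlen hq hp0
    have : False := by simp at hjlen; omega
    exact absurd trivial (fun _ => this)
  obtain ⟨h1, h2, h3⟩ := siftdown_spec (h ++ [x]) h.length hpos hJ1 hJ2
  refine ⟨?_, h2.trans (List.perm_append_singleton x h), h3⟩
  unfold heappush
  rw [h1]; simp

-- one step of _siftup's loop preserves the hole invariants
theorem siftupStep_inv (newitem : Int) (heap : List Int) (pos c : Nat)
    (hpos : pos < heap.length) (hclen : c < heap.length) (hposc : pos < c)
    (hcc : (c - 1) / 2 = pos)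
    (hsmall : ∀ s : Nat, 0 < s → s < heap.length → (s - 1) / 2 = pos → heap.getD c 0 ≤ heap.getD s 0)
    (hK1 : ∀ j : Nat, 0 < j → j < heap.length → j ≠ pos → (j - 1) / 2 ≠ pos →
      (heap.set pos newitem).getD ((j - 1) / 2) 0 ≤ (heap.set pos newitem).getD j 0)
    (hK2 : GrandBound (heap.set pos newitem) pos) :
    (∀ j : Nat, 0 < j → j < heap.length → j ≠ c → (j - 1) / 2 ≠ c →
      ((heap.set pos (heap.getD c 0)).set c newitem).getD ((j - 1) / 2) 0 ≤
      ((heap.set pos (heap.getD c 0)).set c newitem).getD j 0) ∧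
    GrandBound ((heap.set pos (heap.getD c 0)).set c newitem) c := by
  have hcpos : c ≠ pos := by omega
  have hDval : ∀ j, ((heap.set pos (heap.getD c 0)).set c newitem).getD j 0 =
      if j = c then newitem else if j = pos then heap.getD c 0 else heap.getD j 0 :=
    fun j => getD_set2 heap pos c j (heap.getD c 0) newitem hpos hclen
  have hCval : ∀ j, (heap.set pos newitem).getD j 0 =
      if j = pos then newitem else heap.getD j 0 :=
    fun j => getD_set' heap pos j newitem 0 hpos
  have hClen : (heap.set pos newitem).length = heap.length := by simp
  constructor
  · intro j hj hjlen hjc hqc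
    rw [hDval, hDval]
    by_cases hjpos : j = pos
    · subst hjpos
      have hp0 : 0 < j := hj
      have hqj : (j - 1) / 2 ≠ j := by omega
      have hqcne : (j - 1) / 2 ≠ c := by omega
      rw [if_neg hqcne, if_neg hqj, if_neg hjc, if_pos rfl]
      have h2 := hK2 c (by rwa [hClen]) hcc hp0
      rw [hCval, hCval, if_neg hqj, if_neg hcpos] at h2
      exact h2
    · by_cases hqpos : (j - 1) / 2 = pos
      · rw [if_neg hqc, if_pos hqpos, if_neg hjc, if_neg hjpos]
        exact hsmall j hj hjlen hqpos
      · rw [if_neg hqc, if_neg hqpos, if_neg hjc, if_neg hjpos]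
        have h1 := hK1 j hj hjlen hjpos hqpos
        rw [hCval, hCval, if_neg hqpos, if_neg hjpos] at h1
        exact h1
  · intro j hjlen hq hc0
    rw [List.length_set, List.length_set] at hjlen
    have hjc : j ≠ c := by omega
    have hjpos : j ≠ pos := by omega
    have hj0 : 0 < j := by omega
    have hqpos : (j - 1) / 2 ≠ pos := by omega
    rw [hDval, hDval, hcc, if_neg (Ne.symm hcpos), if_pos rfl, if_neg hjc, if_neg hjpos]
    have h1 := hK1 j hj0 hjlen hjpos hqpos
    rw [hCval, hCval, if_neg hqpos, if_neg hjpos, hq] at h1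
    exact h1

theorem siftupLoop_spec (newitem : Int) :
    ∀ (pos : Nat) (heap : List Int), pos < heap.length →
    (∀ j : Nat, 0 < j → j < heap.length → j ≠ pos → (j - 1) / 2 ≠ pos →
      (heap.set pos newitem).getD ((j - 1) / 2) 0 ≤ (heap.set pos newitem).getD j 0) →
    GrandBound (heap.set pos newitem) pos →
    (siftupLoop heap.length heap pos).2 < heap.length ∧
    (siftupLoop heap.length heap pos).1.length = heap.length ∧
    ((siftupLoop heap.length heap pos).1.set (siftupLoop heap.length heap pos).2 newitem).Perm
      (heap.set pos newitem) ∧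
    EdgesExcept ((siftupLoop heap.length heap pos).1.set (siftupLoop heap.length heap pos).2 newitem)
      (siftupLoop heap.length heap pos).2 ∧
    heap.length ≤ 2 * (siftupLoop heap.length heap pos).2 + 1 := by
  suffices H : ∀ (n pos : Nat) (heap : List Int), heap.length - pos = n → pos < heap.length →
      (∀ j : Nat, 0 < j → j < heap.length → j ≠ pos → (j - 1) / 2 ≠ pos →
        (heap.set pos newitem).getD ((j - 1) / 2) 0 ≤ (heap.set pos newitem).getD j 0) →
      GrandBound (heap.set pos newitem) pos →
      (siftupLoop heap.length heap pos).2 < heap.length ∧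
      (siftupLoop heap.length heap pos).1.length = heap.length ∧
      ((siftupLoop heap.length heap pos).1.set (siftupLoop heap.length heap pos).2 newitem).Perm
        (heap.set pos newitem) ∧
      EdgesExcept ((siftupLoop heap.length heap pos).1.set (siftupLoop heap.length heap pos).2 newitem)
        (siftupLoop heap.length heap pos).2 ∧
      heap.length ≤ 2 * (siftupLoop heap.length heap pos).2 + 1 by
    intro pos heap h1 h2 h3
    exact H _ pos heap rfl h1 h2 h3
  intro n
  induction n using Nat.strong_induction_on with
  | _ n IH =>
    intro pos heap hn hpos hK1 hK2
    rw [siftupLoop]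
    split
    · next hlt =>
      dsimp only
      -- establish facts about the selected child c, then recurse
      have hstep : ∀ c : Nat, c < heap.length → pos < c → (c - 1) / 2 = pos →
          (∀ s : Nat, 0 < s → s < heap.length → (s - 1) / 2 = pos → heap.getD c 0 ≤ heap.getD s 0) →
          (siftupLoop heap.length (heap.set pos (heap.getD c 0)) c).2 < heap.length ∧
          (siftupLoop heap.length (heap.set pos (heap.getD c 0)) c).1.length = heap.length ∧
          ((siftupLoop heap.length (heap.set pos (heap.getD c 0)) c).1.set
            (siftupLoop heap.length (heap.set pos (heap.getD c 0)) c).2 newitem).Perm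
            (heap.set pos newitem) ∧
          EdgesExcept ((siftupLoop heap.length (heap.set pos (heap.getD c 0)) c).1.set
            (siftupLoop heap.length (heap.set pos (heap.getD c 0)) c).2 newitem)
            (siftupLoop heap.length (heap.set pos (heap.getD c 0)) c).2 ∧
          heap.length ≤ 2 * (siftupLoop heap.length (heap.set pos (heap.getD c 0)) c).2 + 1 := by
        intro c hclen hposc hcc hsmall
        obtain ⟨k1', k2'⟩ := siftupStep_inv newitem heap pos c hpos hclen hposc hcc hsmall hK1 hK2
        have hlen' : (heap.set pos (heap.getD c 0)).length = heap.length := by simp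
        have ihres := IH (heap.length - c) (by omega) c (heap.set pos (heap.getD c 0))
          (by simp) (by simpa using hclen)
          (by simpa [hlen'] using k1') (by simpa [hlen'] using k2')
        rw [hlen'] at ihres
        obtain ⟨i1, i2, i3, i4, i5⟩ := ihres
        refine ⟨i1, i2, i3.trans ?_, i4, i5⟩
        -- (heap.set pos heap[c]).set c newitem is a transposition of heap.set pos newitem
        have h1 : pos < (heap.set pos newitem).length := by simpa using hpos
        have h2 : c < (heap.set pos newitem).length := by simpa using hclen
        have hperm := List.set_set_perm (as := heap.set pos newitem) h1 h2
        have e1 : (heap.set pos newitem)[c] = heap.getD c 0 := by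
          rw [List.getElem_set, if_neg (by omega : ¬ pos = c)]
          exact (List.getD_eq_getElem heap 0 hclen).symm
        have e2 : (heap.set pos newitem)[pos] = newitem := by
          rw [List.getElem_set, if_pos rfl]
        rw [e1, e2, List.set_set] at hperm
        exact hperm
      split
      · next hcond =>
        exact hstep (2 * pos + 1 + 1) hcond.1 (by omega) (by omega) (by
          intro s hs0 hs hsp
          have : s = 2 * pos + 1 ∨ s = 2 * pos + 1 + 1 := by omega
          rcases this with h | h <;> subst h
          · exact not_lt.mp hcond.2
          · exact le_refl _)
      · next hcond =>
        have hcond' : 2 * pos + 1 + 1 < heap.length →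
            heap.getD (2 * pos + 1) 0 < heap.getD (2 * pos + 1 + 1) 0 := by
          intro h; by_contra hh; exact hcond ⟨h, hh⟩
        exact hstep (2 * pos + 1) hlt (by omega) (by omega) (by
          intro s hs0 hs hsp
          have : s = 2 * pos + 1 ∨ s = 2 * pos + 1 + 1 := by omega
          rcases this with h | h <;> subst h
          · exact le_refl _
          · exact le_of_lt (hcond' hs))
    · next hge =>
      refine ⟨hpos, rfl, List.Perm.refl _, ?_, by omega⟩
      intro j hj hjlen hjne
      have hjlen' : j < heap.length := by simpa using hjlen
      have hqpos : (j - 1) / 2 ≠ pos := by omega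
      exact hK1 j hj hjlen' hjne hqpos

theorem siftup_spec (heap : List Int) (hne : heap ≠ [])
    (h1 : ∀ j : Nat, 0 < j → j < heap.length → (j - 1) / 2 ≠ 0 →
      heap.getD ((j - 1) / 2) 0 ≤ heap.getD j 0) :
    (siftup heap 0).length = heap.length ∧
    (siftup heap 0).Perm heap ∧ IsHeap (siftup heap 0) := by
  have h0 : 0 < heap.length := List.length_pos_iff.mpr hne
  have hself : heap.set 0 (heap.getD 0 0) = heap := by
    rw [List.getD_eq_getElem heap 0 h0]
    exact List.set_getElem_self h0
  obtain ⟨s1, s2, s3, s4, s5⟩ := siftupLoop_spec (heap.getD 0 0) 0 heap h0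
    (by rw [hself]; exact fun j a b _ d => h1 j a b d)
    (fun j _ _ hp => absurd hp (lt_irrefl 0))
  rw [hself] at s3
  unfold siftup
  dsimp only
  have hMlen : ((siftupLoop heap.length heap 0).1.set (siftupLoop heap.length heap 0).2
      (heap.getD 0 0)).length = heap.length := by rw [List.length_set]; exact s2
  obtain ⟨d1, d2, d3⟩ := siftdown_spec _ (siftupLoop heap.length heap 0).2
    (by rw [hMlen]; exact s1) s4
    (by
      intro j hjlen hq hp0
      rw [hMlen] at hjlen
      omega)
  exact ⟨d1.trans hMlen, d2.trans s3, d3⟩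

theorem heappop_spec (heap : List Int) (hne : heap ≠ []) (hh : IsHeap heap) :
    (heappop heap).1 = heap.getD 0 0 ∧
    ((heappop heap).1 :: (heappop heap).2).Perm heap ∧ IsHeap (heappop heap).2 := by
  unfold heappop
  match hl : heap.getLast? with
  | none => exact absurd (List.getLast?_eq_none_iff.mp hl) hne
  | some lastelt =>
    have hgl : heap.getLast hne = lastelt := by
      have h2 := List.getLast?_eq_some_getLast hne
      rw [hl] at h2
      exact (Option.some_inj.mp h2).symm
    have hdl : heap = heap.dropLast ++ [lastelt] := by
      conv_lhs => rw [← List.dropLast_append_getLast hne]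
      rw [hgl]
    dsimp only
    split
    · next hre =>
      have hrest : heap.dropLast = [] := List.isEmpty_iff.mp hre
      rw [hrest] at hdl
      subst hdl
      refine ⟨rfl, List.Perm.refl _, ?_⟩
      intro j hj hjlen
      simp at hjlen
    · next hre =>
      have hrest : heap.dropLast ≠ [] := fun h => hre (List.isEmpty_iff.mpr h)
      have hr0 : 0 < heap.dropLast.length := List.length_pos_iff.mpr hrest
      have hret : heap.dropLast.getD 0 0 = heap.getD 0 0 := by
        conv_rhs => rw [hdl]
        rw [List.getD_append _ _ _ _ hr0]
      have hne' : heap.dropLast.set 0 lastelt ≠ [] :=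
        List.ne_nil_of_length_pos (by simpa using hr0)
      have hprem : ∀ j : Nat, 0 < j → j < (heap.dropLast.set 0 lastelt).length →
          (j - 1) / 2 ≠ 0 →
          (heap.dropLast.set 0 lastelt).getD ((j - 1) / 2) 0 ≤
          (heap.dropLast.set 0 lastelt).getD j 0 := by
        intro j hj hjlen hq
        rw [List.length_set] at hjlen
        have hqlt : (j - 1) / 2 < heap.dropLast.length := by omega
        rw [getD_set' _ _ _ _ _ hr0, getD_set' _ _ _ _ _ hr0,
            if_neg (by omega : j ≠ 0), if_neg hq]
        have e1 : heap.dropLast.getD ((j - 1) / 2) 0 = heap.getD ((j - 1) / 2) 0 := by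
          conv_rhs => rw [hdl]
          rw [List.getD_append _ _ _ _ hqlt]
        have e2 : heap.dropLast.getD j 0 = heap.getD j 0 := by
          conv_rhs => rw [hdl]
          rw [List.getD_append _ _ _ _ hjlen]
        rw [e1, e2]
        have hjheap : j < heap.length := by
          have : heap.length = heap.dropLast.length + 1 := by
            conv_lhs => rw [hdl]
            simp
          omega
        exact hh j hj hjheap
      obtain ⟨u1, u2, u3⟩ := siftup_spec (heap.dropLast.set 0 lastelt) hne' hprem
      refine ⟨hret, ?_, u3⟩
      dsimp only
      refine (u2.cons (heap.dropLast.getD 0 0)).trans ?_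
      -- heap.dropLast.getD 0 0 :: (dropLast.set 0 lastelt) ~ heap
      obtain ⟨d0, t, hdt⟩ : ∃ d0 t, heap.dropLast = d0 :: t := by
        cases hc : heap.dropLast with
        | nil => exact absurd hc hrest
        | cons a b => exact ⟨a, b, rfl⟩
      rw [hdt]
      simp only [List.getD_cons_zero, List.set_cons_zero]
      conv_rhs => rw [hdl, hdt]
      rw [List.cons_append]
      exact List.Perm.cons d0 (List.perm_append_singleton lastelt t).symm

-- unconditional length preservation (needed for fullpops termination)
theorem siftdownLoop_length (newitem : Int) (startpos : Nat) :
    ∀ (pos : Nat) (heap : List Int), (siftdownLoop newitem startpos heap pos).1.length = heap.length := by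
  intro pos
  induction pos using Nat.strong_induction_on with
  | _ pos IH =>
    intro heap
    rw [siftdownLoop]
    split
    · next h =>
      dsimp only
      split
      · rw [IH _ (by omega)]; simp
      · rfl
    · rfl

theorem siftdown_length (heap : List Int) (startpos pos : Nat) :
    (siftdown heap startpos pos).length = heap.length := by
  simp [siftdown, siftdownLoop_length]

theorem siftupLoop_length (endpos : Nat) :
    ∀ (pos : Nat) (heap : List Int), (siftupLoop endpos heap pos).1.length = heap.length := by
  intro pos
  induction hi : endpos - pos using Nat.strong_induction_on generalizing pos with
  | _ n IH =>
    intro heap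
    rw [siftupLoop]
    split
    · next h =>
      dsimp only
      subst hi
      rw [IH _ (by split <;> omega) _ rfl]; simp
    · rfl

theorem siftup_length (heap : List Int) (pos : Nat) :
    (siftup heap pos).length = heap.length := by
  simp [siftup, siftdown_length, siftupLoop_length]

theorem heappop_length (heap : List Int) (hne : heap ≠ []) :
    (heappop heap).2.length = heap.length - 1 := by
  unfold heappop
  match hl : heap.getLast? with
  | none => exact absurd (List.getLast?_eq_none_iff.mp hl) hne
  | some lastelt =>
    simp only []
    split
    · next hre =>
      have : heap.dropLast.length = 0 := by simp [List.isEmpty_iff] at hre; simp [hre]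
      simp at this ⊢
      omega
    · simp [siftup_length]

-- popping everything off a heap
def fullpops (h : List Int) : List Int :=
  if hne : h = [] then [] else
    have : (heappop h).2.length < h.length := by
      rw [heappop_length h hne]
      have : h.length ≠ 0 := fun h0 => hne (List.eq_nil_of_length_eq_zero h0)
      omega
    (heappop h).1 :: fullpops (heappop h).2
termination_by h.length

theorem root_le (h : List Int) (hh : IsHeap h) :
    ∀ j : Nat, j < h.length → h.getD 0 0 ≤ h.getD j 0 := by
  intro j
  induction j using Nat.strong_induction_on with
  | _ j IH =>
    intro hjlen
    by_cases hj : j = 0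
    · subst hj; exact le_refl _
    · exact le_trans (IH ((j - 1) / 2) (by omega) (by omega)) (hh j (by omega) hjlen)

theorem fullpops_spec (h : List Int) (hh : IsHeap h) :
    (fullpops h).Pairwise (· ≤ ·) ∧ (fullpops h).Perm h := by
  suffices H : ∀ (n : Nat) (h : List Int), h.length = n → IsHeap h →
      (fullpops h).Pairwise (· ≤ ·) ∧ (fullpops h).Perm h by
    exact H h.length h rfl hh
  intro n
  induction n using Nat.strong_induction_on with
  | _ n IH =>
    intro h hn hh
    rw [fullpops]
    split
    · next heq => subst heq; simp
    · next hne =>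
      obtain ⟨p1, p2, p3⟩ := heappop_spec h hne hh
      have hlen := heappop_length h hne
      have h0 : 0 < h.length := List.length_pos_iff.mpr hne
      obtain ⟨IH1, IH2⟩ := IH ((heappop h).2.length) (by omega) (heappop h).2 rfl p3
      constructor
      · rw [List.pairwise_cons]
        refine ⟨?_, IH1⟩
        intro y hy
        have hyh : y ∈ h := p2.subset (List.mem_cons_of_mem _ (IH2.subset hy))
        obtain ⟨i, hi, rfl⟩ := List.mem_iff_getElem.mp hyh
        rw [p1, ← List.getD_eq_getElem h 0 hi]
        exact root_le h hh i hi
      · exact (IH2.cons _).trans p2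

theorem popLoop_take : ∀ (n : Nat) (heap acc : List Int), n ≤ heap.length →
    (popLoop n heap acc).1 = acc ++ (fullpops heap).take n := by
  intro n
  induction n with
  | zero => intro heap acc _; simp [popLoop]
  | succ m IHm =>
    intro heap acc hle
    have hne : heap ≠ [] := by
      intro h; subst h; simp at hle
    rw [popLoop, fullpops, dif_neg hne]
    rw [IHm _ _ (by have := heappop_length heap hne; omega)]
    simp [List.append_assoc]

theorem popLoopNeg_take : ∀ (n : Nat) (heap acc : List Int), n ≤ heap.length →
    (popLoopNeg n heap acc).1 = acc ++ ((fullpops heap).take n).map (fun v => -v) := by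
  intro n
  induction n with
  | zero => intro heap acc _; simp [popLoopNeg]
  | succ m IHm =>
    intro heap acc hle
    have hne : heap ≠ [] := by
      intro h; subst h; simp at hle
    rw [popLoopNeg, fullpops, dif_neg hne]
    rw [IHm _ _ (by have := heappop_length heap hne; omega)]
    simp [List.append_assoc]

theorem foldl_heappush_spec (g : Int → Int) (xs : List Int) :
    ∀ h : List Int, IsHeap h →
    IsHeap (xs.foldl (fun a x => heappush a (g x)) h) ∧
    (xs.foldl (fun a x => heappush a (g x)) h).Perm (h ++ xs.map g) := by
  induction xs with
  | nil => intro h hh; exact ⟨hh, by simp⟩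
  | cons x xs IHx =>
    intro h hh
    simp only [List.foldl_cons, List.map_cons]
    obtain ⟨hp1, hp2, hp3⟩ := heappush_spec h (g x) hh
    obtain ⟨IH1, IH2⟩ := IHx (heappush h (g x)) hp3
    exact ⟨IH1, IH2.trans ((hp2.append_right (xs.map g)).trans List.perm_middle.symm)⟩

-- a prefix read off by indices is a take
theorem map_range_getD_take (s : List Int) (m : Nat) (hm : m ≤ s.length) :
    (List.range m).map (fun j => s.getD j 0) = s.take m := by
  apply List.ext_getElem
  · simp [hm]
  · intro i h1 h2
    simp only [List.getElem_map, List.getElem_range, List.getElem_take]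
    have hi : i < s.length := by simp at h1; omega
    exact List.getD_eq_getElem s 0 hi

-- the back-to-front read is a take of the reverse
theorem map_range_rev_take (s : List Int) (m : Nat) (hm : m ≤ s.length) :
    (List.range m).map (fun j : Nat => PySem.List.pyGetD s ((s.length : Int) - 1 - (j : Int)) 0) =
      s.reverse.take m := by
  apply List.ext_getElem
  · simp [hm]
  · intro i h1 h2
    have hi : i < m := by simpa using h1
    simp only [List.getElem_map, List.getElem_range, List.getElem_take, List.getElem_reverse]
    rw [PySem.List.pyGetD_eq_getElem s 0 (by omega) (by omega)]
    congr 1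
    omega

theorem sorted_reverse_neg (xs : List Int) :
    PySem.List.sorted (xs.map (fun x => -x)) (fun x => x) false =
      ((PySem.List.sorted xs (fun x => x) false).reverse).map (fun x => -x) := by
  apply PySem.List.sorted_id_eq_of_perm_of_pairwise
  · exact ((PySem.List.sorted xs (fun x => x) false).reverse_perm.map _).trans
      ((PySem.List.sorted_perm xs (fun x => x) false).map _)
  · rw [List.pairwise_map, List.pairwise_reverse]
    exact (PySem.List.sorted_pairwise xs (fun x => x)).imp (fun hab => by omega)

-- ===== VERDICT (by name: the statement is the Claim_ definition above) =====
theorem solve_spec : Claim_equal_solve := by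
  intro xs k1 k2 _hdom hpre
  obtain ⟨hk1, hk2⟩ := hpre
  unfold Spec_solve solve solve_alt
  dsimp only
  have hnil : IsHeap ([] : List Int) := by intro j hj hjlen; simp at hjlen
  obtain ⟨hLheap, hLperm⟩ := foldl_heappush_spec (fun x => x) xs [] hnil
  obtain ⟨hHheap, hHperm⟩ := foldl_heappush_spec (fun x => -x) xs [] hnil
  have hLperm' : (xs.foldl (fun h x => heappush h x) []).Perm xs := by simpa using hLperm
  have hHperm' : (xs.foldl (fun h x => heappush h (-x)) []).Perm (xs.map (fun x => -x)) := by
    simpa using hHperm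
  obtain ⟨hfL1, hfL2⟩ := fullpops_spec _ hLheap
  obtain ⟨hfH1, hfH2⟩ := fullpops_spec _ hHheap
  have hsL : PySem.List.sorted xs (fun x => x) false =
      fullpops (xs.foldl (fun h x => heappush h x) []) :=
    PySem.List.sorted_id_eq_of_perm_of_pairwise _ _ (hfL2.trans hLperm') hfL1
  have hsH : PySem.List.sorted (xs.map (fun x => -x)) (fun x => x) false =
      fullpops (xs.foldl (fun h x => heappush h (-x)) []) :=
    PySem.List.sorted_id_eq_of_perm_of_pairwise _ _ (hfH2.trans hHperm') hfH1
  set s := PySem.List.sorted xs (fun x => x) false with hs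
  have hslen : s.length = xs.length := (PySem.List.sorted_perm xs _ false).length_eq
  have hLlen : (xs.foldl (fun h x => heappush h x) []).length = xs.length := hLperm'.length_eq
  have hHlen : (xs.foldl (fun h x => heappush h (-x)) []).length = xs.length := by
    rw [hHperm'.length_eq, List.length_map]
  have hk1' : k1.toNat ≤ xs.length := by omega
  have hk2' : k2.toNat ≤ xs.length := by omega
  have hlowsA : (popLoop k1.toNat (xs.foldl (fun h x => heappush h x) []) []).1 =
      s.take k1.toNat := by
    rw [popLoop_take _ _ _ (by rw [hLlen]; exact hk1'), ← hsL]
    simp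
  have hhighsA : (popLoopNeg k2.toNat (xs.foldl (fun h x => heappush h (-x)) []) []).1 =
      s.reverse.take k2.toNat := by
    rw [popLoopNeg_take _ _ _ (by rw [hHlen]; exact hk2'), ← hsH,
        sorted_reverse_neg, ← hs, ← List.map_take, List.map_map]
    simp
  have hlowsB : (PySem.List.pyRange 0 k1).map (fun i => PySem.List.pyGetD s i 0) =
      s.take k1.toNat := by
    rw [PySem.List.pyRange_one, List.map_map, Int.sub_zero]
    have hcomp : ((fun i => PySem.List.pyGetD s i 0) ∘ fun k : Nat => (0 : Int) + ↑k) =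
        fun k : Nat => s.getD k 0 := by
      funext k; simp
    rw [hcomp]
    exact map_range_getD_take s k1.toNat (by rw [hslen]; exact hk1')
  have hhighsB : (PySem.List.pyRange 0 k2).map
        (fun i => PySem.List.pyGetD s (PySem.List.len s - 1 - i) 0) =
      s.reverse.take k2.toNat := by
    rw [PySem.List.pyRange_one, List.map_map, Int.sub_zero]
    have hcomp : ((fun i => PySem.List.pyGetD s (PySem.List.len s - 1 - i) 0) ∘
          fun k : Nat => (0 : Int) + ↑k) =
        fun j : Nat => PySem.List.pyGetD s ((s.length : Int) - 1 - (j : Int)) 0 := by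
      funext k; simp
    rw [hcomp]
    exact map_range_rev_take s k2.toNat (by rw [hslen]; exact hk2')
  rw [hlowsA, hhighsA, hlowsB, hhighsB]
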